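-- pv_equiv track=rewrite | github.com/pypi-data/pypi-mirror-253 | packages/PDAnalysis-fit/PDAnalysis_fit-0.3.0.tar.gz/PDAnalysis_fit-0.3.0/PDAnalysis_fit/utilities.py | get_voltage_values
-- ===== SOURCE A (Python) =====
-- def get_voltage_values(data):
--     voltage_array = [0]
--     index_array = [0] # adding the starting index as 0
--     voltage_array[0] = data[0]
--     j = 0
--     for i in range(len(data)):
--         if data[i] != voltage_array[j]:
--             voltage_array.append(data[i])
--             index_array.append(i)
--             j += 1
--     index_array.append(len(data)) # adding the final data point index
--     return voltage_array, index_array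
-- ===== SOURCE B (Python) =====
-- def get_voltage_values(data):
--     # two-pointer run skipping: outer loop per run, inner scan to the run's end
--     n = len(data)
--     voltage_array = []
--     index_array = []
--     i = 0
--     while i < n:
--         voltage_array.append(data[i])
--         index_array.append(i)
--         j = i
--         while j < n and data[j] == data[i]:
--             j += 1
--         i = j
--     index_array.append(n)
--     return voltage_array, index_array
-- ===== Notes on version B (the rewrite author's own statement) =====
-- stated objective: alternative
-- what changed: Replaces A's per-element scan comparing each sample against the last stored voltage with a two-pointer run-skipping traversal: an outer loop visits only run starts and an inner while advances the second pointer to the end of the current run.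
import Mathlib
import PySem

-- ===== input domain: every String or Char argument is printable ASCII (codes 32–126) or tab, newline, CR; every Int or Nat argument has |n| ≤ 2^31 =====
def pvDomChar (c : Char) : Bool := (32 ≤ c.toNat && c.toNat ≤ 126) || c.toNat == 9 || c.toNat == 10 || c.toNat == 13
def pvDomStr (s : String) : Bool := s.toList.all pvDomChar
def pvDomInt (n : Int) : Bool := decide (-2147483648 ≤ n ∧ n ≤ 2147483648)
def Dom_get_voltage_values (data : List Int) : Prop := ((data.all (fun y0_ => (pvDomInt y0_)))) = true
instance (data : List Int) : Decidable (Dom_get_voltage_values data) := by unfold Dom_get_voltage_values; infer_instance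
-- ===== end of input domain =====

-- B replaces A's per-element scan (comparing each sample to the last stored voltage)
-- with a two-pointer run-skipping traversal: the outer loop visits only run starts, an
-- inner while advances a second pointer to the end of the current run.

-- ===== PORT A =====
def get_voltage_values (data : List Int) : List Int × List Int :=
  match PySem.List.pyGet? data 0 with
  | none => ([], [])   -- the initial element access raises IndexError on empty data; excluded by Pre_
  | some d0 =>
    let s := (PySem.List.pyRange 0 data.length 1).foldl
      (fun (st : List Int × List Int × Int) i =>
        if PySem.List.pyGetD data i 0 ≠ PySem.List.pyGetD st.1 st.2.2 0
        then (st.1 ++ [PySem.List.pyGetD data i 0], st.2.1 ++ [i], st.2.2 + 1)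
        else st)
      ([d0], [(0 : Int)], (0 : Int))
    (s.1, s.2.1 ++ [(data.length : Int)])

-- ===== PORT B =====
-- inner while loop: 'j = i; while j < n and data[j] == data[i]: j += 1'
def pvSkip (data : List Int) (i j : Nat) : Nat :=
  if h : j < data.length ∧ PySem.List.pyGetD data (j : Int) 0 = PySem.List.pyGetD data (i : Int) 0
  then pvSkip data i (j + 1)
  else j
termination_by data.length - j
decreasing_by omega

-- cited by pvOuter's decreasing_by: the inner while strictly advances the outer pointer
theorem pvSkip_ge (data : List Int) (i j : Nat) : j ≤ pvSkip data i j := by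
  rw [pvSkip]
  split
  · have := pvSkip_ge data i (j + 1); omega
  · exact le_refl j
termination_by data.length - j
decreasing_by omega

theorem pvSkip_gt (data : List Int) (i : Nat) (h : i < data.length) : i < pvSkip data i i := by
  rw [pvSkip]
  rw [dif_pos ⟨h, rfl⟩]
  have := pvSkip_ge data i (i + 1)
  omega

-- outer while loop: one iteration per run; the final append of len(data) is the base case
def pvOuter (data : List Int) (i : Nat) : List Int × List Int :=
  if h : i < data.length then
    let j := pvSkip data i i
    let r := pvOuter data j
    (PySem.List.pyGetD data (i : Int) 0 :: r.1, ((i : Int)) :: r.2)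
  else ([], [(data.length : Int)])
termination_by data.length - i
decreasing_by have := pvSkip_gt data i h; omega

def get_voltage_values_alt (data : List Int) : List Int × List Int :=
  pvOuter data 0

-- ===== PRECONDITION & SPEC =====
-- Pre_ excludes only the empty list, on which A's initial read of the first element raises IndexError there.
def Pre_get_voltage_values (data : List Int) : Prop := data ≠ []
instance (data : List Int) : Decidable (Pre_get_voltage_values data) := by unfold Pre_get_voltage_values; infer_instance
def pvWitness_get_voltage_values : List Int := [3, 3, 5, 5, 3]

def Spec_get_voltage_values (data : List Int) (out : List Int × List Int) : Prop := out = get_voltage_values_alt data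
instance (data : List Int) (out : List Int × List Int) : Decidable (Spec_get_voltage_values data out) := by unfold Spec_get_voltage_values; infer_instance

-- ===== CLAIM (what is proved, stated in full; the proofs are below) =====
def Claim_equal_get_voltage_values : Prop := ∀ (data : List Int), Dom_get_voltage_values data → Pre_get_voltage_values data → Spec_get_voltage_values data (get_voltage_values data)

-- ===== LEMMAS AND PROOFS =====

-- data[i] with default 0 (all accesses in both ports are in range on Pre_)
def pvG (data : List Int) (i : Int) : Int := PySem.List.pyGetD data i 0

-- the change-index table after scanning indices [0, m)
def pvC (data : List Int) (m : Nat) : List Int :=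
  (0 : Int) :: (PySem.List.pyRange 1 m 1).filter
      (fun i => pvG data i ≠ pvG data (i - 1))

-- the change-index table from position i on (B's outer loop visits exactly these)
def pvChg (data : List Int) (i : Nat) : List Int :=
  ((i : Int)) :: (PySem.List.pyRange ((i : Int) + 1) data.length 1).filter
      (fun k => pvG data k ≠ pvG data (k - 1))

theorem pvGetD_last (xs : List Int) (h : xs ≠ []) :
    PySem.List.pyGetD xs ((xs.length : Int) - 1) 0 = xs.getLast?.getD 0 := by
  have hlen : 0 < xs.length := List.length_pos_iff.mpr h
  rw [PySem.List.pyGetD_eq_getElem xs 0 (by omega) (by omega),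
      List.getLast?_eq_some_getLast h, Option.getD_some, List.getLast_eq_getElem]
  congr 1
  omega

theorem pvLoopA (data : List Int) (d0 : Int) (h0 : pvG data 0 = d0) (m : Nat) :
    ((PySem.List.pyRange 0 m 1).foldl
      (fun (st : List Int × List Int × Int) i =>
        if PySem.List.pyGetD data i 0 ≠ PySem.List.pyGetD st.1 st.2.2 0
        then (st.1 ++ [PySem.List.pyGetD data i 0], st.2.1 ++ [i], st.2.2 + 1)
        else st)
      ([d0], [(0 : Int)], (0 : Int))
      = ((pvC data m).map (pvG data), pvC data m, ((pvC data m).length : Int) - 1))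
    ∧ pvG data (((pvC data m).getLast?).getD 0) = pvG data (↑(m - 1)) := by
  induction m with
  | zero =>
    constructor
    · simp [pvC, PySem.List.pyRange_one_eq_nil]
      exact h0.symm
    · simp [pvC, PySem.List.pyRange_one_eq_nil]
  | succ m ih =>
    obtain ⟨ihs, ihl⟩ := ih
    have hrange : PySem.List.pyRange 0 (↑(m + 1)) 1
        = PySem.List.pyRange 0 (↑m) 1 ++ [(m : Int)] := by
      have := PySem.List.pyRange_one_succ_right (a := 0) (b := (m : Int)) (by positivity)
      push_cast
      push_cast at this
      exact this
    rw [hrange, List.foldl_append, ihs]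
    have hCne : (pvC data m).map (pvG data) ≠ [] := by simp [pvC]
    have hlast : PySem.List.pyGetD ((pvC data m).map (pvG data))
        (((pvC data m).length : Int) - 1) 0 = pvG data (↑(m - 1)) := by
      have h1 := pvGetD_last ((pvC data m).map (pvG data)) hCne
      simp only [List.length_map, List.getLast?_map] at h1
      rw [h1]
      rcases hl : (pvC data m).getLast? with _ | c
      · exact absurd hl (by simp [pvC])
      · rw [hl] at ihl
        simpa using ihl
    by_cases hm : m = 0
    · subst hm
      have hC1 : pvC data 1 = pvC data 0 := by
        simp [pvC, PySem.List.pyRange_one_eq_nil]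
      simp only [List.foldl_cons, List.foldl_nil]
      rw [hlast]
      have hcond : ¬ (PySem.List.pyGetD data (((0 : Nat) : Int)) 0
          ≠ pvG data ((((0 : Nat) - 1 : Nat)) : Int)) := by
        simp [pvG]
      rw [if_neg hcond, hC1]
      exact ⟨rfl, by simpa using ihl⟩
    · have hm1 : ((m - 1 : Nat) : Int) = (m : Int) - 1 := by omega
      have hr : PySem.List.pyRange 1 (↑(m + 1)) 1
          = PySem.List.pyRange 1 (↑m) 1 ++ [(m : Int)] := by
        have := PySem.List.pyRange_one_succ_right (a := 1) (b := (m : Int)) (by omega)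
        push_cast
        push_cast at this
        exact this
      simp only [List.foldl_cons, List.foldl_nil]
      rw [hlast, hm1]
      by_cases hp : pvG data (m : Int) ≠ pvG data ((m : Int) - 1)
      · have hC : pvC data (m + 1) = pvC data m ++ [(m : Int)] := by
          simp only [pvC, hr, List.filter_append]
          simp [hp]
        rw [if_pos (by simpa [pvG] using hp), hC]
        constructor
        · refine Prod.ext ?_ (Prod.ext ?_ ?_)
          · simp [pvG]
          · rfl
          · simp
        · simp [pvG]
      · have hC : pvC data (m + 1) = pvC data m := by
          simp only [pvC, hr, List.filter_append]
          simp [hp]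
        rw [if_neg (by simpa [pvG] using hp), hC]
        simp only [ne_eq, not_not] at hp
        refine ⟨rfl, ?_⟩
        rw [ihl, hm1, ← hp]
        simp

-- the inner while stops at or before the end of the data
theorem pvSkip_le (data : List Int) (i j : Nat) (h : j ≤ data.length) :
    pvSkip data i j ≤ data.length := by
  rw [pvSkip]
  split
  · next hc => exact pvSkip_le data i (j + 1) (by omega)
  · exact h
termination_by data.length - j
decreasing_by omega

-- everything strictly before the stop point belongs to the current run
theorem pvSkip_run (data : List Int) (i j : Nat) :
    ∀ k : Nat, j ≤ k → k < pvSkip data i j →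
      PySem.List.pyGetD data (k : Int) 0 = PySem.List.pyGetD data (i : Int) 0 := by
  intro k hk1 hk2
  rw [pvSkip] at hk2
  split at hk2
  · next hc =>
    by_cases hkj : k = j
    · subst hkj; exact hc.2
    · exact pvSkip_run data i (j + 1) k (by omega) hk2
  · omega
termination_by data.length - j
decreasing_by omega

-- if the stop point is in range, the run really ends there
theorem pvSkip_stop (data : List Int) (i j : Nat)
    (h : pvSkip data i j < data.length) :
    PySem.List.pyGetD data ((pvSkip data i j : Nat) : Int) 0 ≠ PySem.List.pyGetD data (i : Int) 0 := by
  rw [pvSkip]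
  split
  · next hc =>
    rw [pvSkip, dif_pos hc] at h
    exact pvSkip_stop data i (j + 1) h
  · next hc =>
    intro heq
    rw [pvSkip, dif_neg hc] at h
    exact hc ⟨h, heq⟩
termination_by data.length - j
decreasing_by omega

-- B's outer loop from any in-range position computes the change table from there
theorem pvBChar (data : List Int) (i : Nat) (h : i < data.length) :
    pvOuter data i = ((pvChg data i).map (pvG data), pvChg data i ++ [(data.length : Int)]) := by
  rw [pvOuter, dif_pos h]
  set j := pvSkip data i i with hj
  show (PySem.List.pyGetD data (i : Int) 0 :: (pvOuter data j).1, ((i : Int)) :: (pvOuter data j).2)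
      = ((pvChg data i).map (pvG data), pvChg data i ++ [(data.length : Int)])
  have hij : i < j := pvSkip_gt data i h
  have hjle : j ≤ data.length := pvSkip_le data i i (by omega)
  have hrun : ∀ k : Nat, i ≤ k → k < j →
      PySem.List.pyGetD data (k : Int) 0 = PySem.List.pyGetD data (i : Int) 0 :=
    fun k h1 h2 => pvSkip_run data i i k h1 h2
  have hsplit : PySem.List.pyRange ((i : Int) + 1) data.length 1
      = PySem.List.pyRange ((i : Int) + 1) (j : Int) 1 ++ PySem.List.pyRange (j : Int) data.length 1 :=
    PySem.List.pyRange_one_append _ _ _ (by omega) (by omega)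
  have hnil : (PySem.List.pyRange ((i : Int) + 1) (j : Int) 1).filter
      (fun k => pvG data k ≠ pvG data (k - 1)) = [] := by
    rw [List.filter_eq_nil_iff]
    intro k hk
    have hk' := (PySem.List.mem_pyRange_one).mp hk
    have hk0 : 0 ≤ k := by omega
    have hkn : k = ((k.toNat : Nat) : Int) := by omega
    have e1 : pvG data k = PySem.List.pyGetD data (i : Int) 0 := by
      rw [pvG, hkn]; exact hrun k.toNat (by omega) (by omega)
    have hkn1 : k - 1 = (((k.toNat - 1 : Nat) : Nat) : Int) := by omega
    have e2 : pvG data (k - 1) = PySem.List.pyGetD data (i : Int) 0 := by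
      rw [pvG, hkn1]; exact hrun (k.toNat - 1) (by omega) (by omega)
    simp [e1, e2]
  by_cases hjn : j = data.length
  · -- last run: nothing after it
    have houter : pvOuter data j = ([], [(data.length : Int)]) := by
      rw [pvOuter, dif_neg (by omega)]
    have hrest : PySem.List.pyRange (j : Int) data.length 1 = [] :=
      PySem.List.pyRange_one_eq_nil (by omega)
    have hchg : pvChg data i = [((i : Int))] := by
      rw [pvChg, hsplit, List.filter_append, hnil, hrest]
      simp
    rw [houter, hchg]
    simp [pvG]
  · -- run ends inside the data: j is the next change index, recurse
    have hjlt : j < data.length := by omega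
    have hstep : PySem.List.pyRange (j : Int) data.length 1
        = (j : Int) :: PySem.List.pyRange ((j : Int) + 1) data.length 1 :=
      PySem.List.pyRange_one_cons (by omega)
    have hkeep : pvG data (j : Int) ≠ pvG data ((j : Int) - 1) := by
      have e1 : pvG data ((j : Int) - 1) = PySem.List.pyGetD data (i : Int) 0 := by
        have : ((j : Int) - 1) = (((j - 1 : Nat) : Nat) : Int) := by omega
        rw [pvG, this]; exact hrun (j - 1) (by omega) (by omega)
      have e2 : PySem.List.pyGetD data ((j : Nat) : Int) 0 ≠ PySem.List.pyGetD data (i : Int) 0 :=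
        pvSkip_stop data i i hjlt
      rw [e1]; exact e2
    have hchg : pvChg data i = ((i : Int)) :: pvChg data j := by
      rw [pvChg, hsplit, List.filter_append, hnil, hstep, pvChg]
      simp [hkeep]
    have ih := pvBChar data j hjlt
    rw [ih, hchg]
    simp [pvG]
termination_by data.length - i
decreasing_by omega

-- ===== VERDICT (by name: the statement is the Claim_ definition above) =====
theorem get_voltage_values_spec : Claim_equal_get_voltage_values := by
  intro data _hdom hpre
  unfold Spec_get_voltage_values
  cases data with
  | nil => exact absurd rfl hpre
  | cons x xs =>
    have h0 : pvG (x :: xs) 0 = x := by simp [pvG]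
    have hmain := (pvLoopA (x :: xs) x h0 (x :: xs).length).1
    have hB := pvBChar (x :: xs) 0 (by simp)
    have hCchg : pvChg (x :: xs) 0 = pvC (x :: xs) (x :: xs).length := by
      simp [pvChg, pvC]
    unfold get_voltage_values get_voltage_values_alt
    rw [PySem.List.pyGet?_zero_cons]
    simp only [hmain]
    rw [hB, hCchg]
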